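-- pv_equiv track=rewrite | github.com/monishstark/DSA | array/unsaved23.py | func
-- ===== SOURCE A (Python) =====
-- def func(a):
--     if not a:
--         return [""]
--     ans=[]
--     re=func(a[1:])
--     for i in re:
--         ans.append(a[0]+i)
--         ans.append(a[0]+" "+i)
--     return ans
-- ===== SOURCE B (Python) =====
-- def func(a):
--     n = len(a)
--     ans = []
--     for mask in range(2 ** n):
--         parts = []
--         for j, ch in enumerate(a):
--             parts.append(ch)
--             if (mask >> j) & 1:
--                 parts.append(" ")
--         ans.append("".join(parts))
--     return ans
-- ===== Notes on version B (the rewrite author's own statement) =====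
-- stated objective: alternative
-- what changed: Replaces A's recursion on the tail (doubling the recursive result) with a single bitmask enumeration: one string per mask in range(2**n), where bit j of the mask inserts a space after character j.
import Mathlib
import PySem

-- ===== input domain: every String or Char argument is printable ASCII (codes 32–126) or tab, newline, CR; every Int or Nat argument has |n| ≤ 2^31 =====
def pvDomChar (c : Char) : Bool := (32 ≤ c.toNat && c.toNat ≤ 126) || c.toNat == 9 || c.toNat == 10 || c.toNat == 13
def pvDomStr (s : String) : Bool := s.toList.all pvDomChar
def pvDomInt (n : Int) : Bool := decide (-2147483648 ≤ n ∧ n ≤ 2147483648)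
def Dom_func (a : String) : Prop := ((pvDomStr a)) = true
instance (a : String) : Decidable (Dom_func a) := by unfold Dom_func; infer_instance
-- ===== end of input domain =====

-- B replaces A's recursion on the tail with a single bitmask enumeration (one string per mask,
-- bit j = space after character j); same values and order, a different decomposition ("alternative").

-- ===== PORT A =====
-- A recurses on a[1:]; we transliterate on the character list: base case [""], then for each
-- string i of the recursive result append a[0]+i and a[0]+" "+i.
def funcAux : List Char → List (List Char)
  | [] => [[]]
  | c :: rest =>
      (funcAux rest).foldl (fun ans i => ans ++ [c :: i] ++ [c :: ' ' :: i]) []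

def func (a : String) : List String := (funcAux a.toList).map String.ofList

-- ===== PORT B =====
-- inner loop of Source B: for j, ch in enumerate(a): parts.append(ch); if (mask >> j) & 1: parts.append(' ')
def altRow : List Char → Nat → Nat → List Char
  | [], _, _ => []
  | c :: rest, mask, j =>
      (c :: (if (mask >>> j) % 2 = 1 then [' '] else [])) ++ altRow rest mask (j + 1)

def func_alt (a : String) : List String :=
  (List.range (2 ^ a.toList.length)).map (fun mask => String.ofList (altRow a.toList mask 0))

-- ===== PRECONDITION & SPEC =====
def Spec_func (a : String) (out : List String) : Prop := out = func_alt a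
instance (a : String) (out : List String) : Decidable (Spec_func a out) := by unfold Spec_func; infer_instance

-- ===== CLAIM (what is proved, stated in full; the proofs are below) =====
def Claim_equal_func : Prop := ∀ (a : String), Dom_func a → Spec_func a (func a)

-- ===== LEMMAS AND PROOFS =====

theorem altRow_shift (l : List Char) : ∀ (mask j : Nat),
    altRow l mask (j + 1) = altRow l (mask >>> 1) j := by
  induction l with
  | nil => intro mask j; rfl
  | cons c rest ih =>
      intro mask j
      have h : mask >>> (j + 1) = (mask >>> 1) >>> j := by
        rw [show j + 1 = 1 + j by omega, Nat.shiftRight_add]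
      simp [altRow, h, ih]

theorem foldl_two {α β : Type} (f g : α → β) :
    ∀ (l : List α) (acc : List β),
    l.foldl (fun ans i => ans ++ [f i] ++ [g i]) acc = acc ++ l.flatMap (fun i => [f i, g i]) := by
  intro l
  induction l with
  | nil => simp
  | cons x xs ih => intro acc; simp [List.append_assoc, List.flatMap_def]

theorem range_double {β : Type} (f : Nat → β) :
    ∀ (N : Nat), (List.range N).flatMap (fun k => [f (2 * k), f (2 * k + 1)]) =
      (List.range (2 * N)).map f := by
  intro N
  induction N with
  | zero => simp
  | succ n ih =>
      rw [List.range_succ, show 2 * (n + 1) = (2 * n + 1) + 1 by ring,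
          List.range_succ, List.range_succ]
      simp [ih]

theorem funcAux_eq (l : List Char) :
    funcAux l = (List.range (2 ^ l.length)).map (fun mask => altRow l mask 0) := by
  induction l with
  | nil => simp [funcAux, altRow]
  | cons c rest ih =>
      have step : ∀ k : Nat,
          altRow (c :: rest) (2 * k) 0 = c :: altRow rest k 0 ∧
          altRow (c :: rest) (2 * k + 1) 0 = c :: ' ' :: altRow rest k 0 := by
        intro k
        have h0 : (2 * k) >>> 0 = 2 * k := rfl
        have h1 : (2 * k + 1) >>> 0 = 2 * k + 1 := rfl
        constructor
        · simp [altRow, altRow_shift, h0, Nat.shiftRight_one,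
            show (2 * k) % 2 = 0 by omega, show 2 * k / 2 = k by omega]
        · simp [altRow, altRow_shift, h1, Nat.shiftRight_one,
            show (2 * k + 1) % 2 = 1 by omega, show (2 * k + 1) / 2 = k by omega]
      calc funcAux (c :: rest)
          = (funcAux rest).flatMap (fun i => [c :: i, c :: ' ' :: i]) := by
            rw [funcAux]; rw [foldl_two]; simp
        _ = (List.range (2 ^ rest.length)).flatMap
              (fun k => [c :: altRow rest k 0, c :: ' ' :: altRow rest k 0]) := by
            rw [ih]; simp [List.flatMap_map]
        _ = (List.range (2 ^ rest.length)).flatMap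
              (fun k => [altRow (c :: rest) (2 * k) 0, altRow (c :: rest) (2 * k + 1) 0]) := by
            apply List.flatMap_congr; intro k _
            rw [(step k).1, (step k).2]
        _ = (List.range (2 ^ (c :: rest).length)).map (fun mask => altRow (c :: rest) mask 0) := by
            rw [range_double (fun mask => altRow (c :: rest) mask 0)]
            simp [pow_succ, Nat.mul_comm]

-- ===== VERDICT (by name: the statement is the Claim_ definition above) =====
theorem func_spec : Claim_equal_func := by
  intro a _
  unfold Spec_func func func_alt
  rw [funcAux_eq, List.map_map]
  rfl
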